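-- pv_equiv track=rewrite | github.com/daniel-baf/url-notas | 0-RES/archivos/binarios/tarea1-carnet.py | generate_file
-- ===== SOURCE A (Python) =====
-- LINE_SEPARATOR = (
--     "\x17"  # this is a non printable character that I use to separate the lines
-- )
--
-- def char_to_ascii(char: str) -> int:
--     return ord(char)
--
-- def generate_file(cadena: str, use_line_separator: bool = False) -> list:
--     # this function convert a string to a list of numbers that represent the ASCII code of each character
--     array = []
--     for line in cadena.split("\n"):
--         # add line separator if true, to reuse this function
--         if use_line_separator:
--             array.append(char_to_ascii(LINE_SEPARATOR))  # name separator
--         for char in line: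
--             array.append(char_to_ascii(char))  # cast current char to ASCII code
--         array.append(char_to_ascii("\n"))  # line separator
--     return array
-- ===== SOURCE B (Python) =====
-- LINE_SEPARATOR = "\x17"
--
--
-- def generate_file(cadena: str, use_line_separator: bool = False) -> list:
--     # single linear pass over the characters; no split, no nested loop
--     out = [ord(LINE_SEPARATOR)] if use_line_separator else []
--     for c in cadena:
--         if c == "\n":
--             out.append(10)
--             if use_line_separator:
--                 out.append(ord(LINE_SEPARATOR))
--         else:
--             out.append(ord(c))
--     out.append(10)
--     return out
-- ===== Notes on version B (the rewrite author's own statement) =====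
-- stated objective: simpler
-- what changed: Replaces the line-splitting pass plus the nested per-line loop with one linear pass over the characters that emits the separator and newline codes inline.
import Mathlib
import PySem

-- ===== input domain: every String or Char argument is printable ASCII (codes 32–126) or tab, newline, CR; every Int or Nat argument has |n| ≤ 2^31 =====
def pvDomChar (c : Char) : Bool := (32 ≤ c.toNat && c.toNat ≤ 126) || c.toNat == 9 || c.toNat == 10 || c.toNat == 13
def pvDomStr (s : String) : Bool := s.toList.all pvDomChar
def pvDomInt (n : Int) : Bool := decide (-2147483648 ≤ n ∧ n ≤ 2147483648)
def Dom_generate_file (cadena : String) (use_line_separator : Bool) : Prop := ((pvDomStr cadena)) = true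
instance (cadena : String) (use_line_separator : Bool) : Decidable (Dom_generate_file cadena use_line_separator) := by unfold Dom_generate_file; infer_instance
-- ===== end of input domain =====

-- B replaces A's split("\n") + nested per-line loop with one linear pass over the characters (simpler decomposition).


-- ===== PORT A =====
def char_to_ascii (c : Char) : Int := (c.toNat : Int)

def generate_file (cadena : String) (use_line_separator : Bool) : List Int :=
  (PySem.Chars.splitOn cadena.toList ['\n']).foldl
    (fun array line =>
      let array := if use_line_separator then array ++ [char_to_ascii '\x17'] else array
      let array := line.foldl (fun a ch => a ++ [char_to_ascii ch]) array
      array ++ [char_to_ascii '\n'])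
    []

-- ===== PORT B =====
def generate_file_alt (cadena : String) (use_line_separator : Bool) : List Int :=
  (cadena.toList.foldl
    (fun out c =>
      if c = '\n' then
        (out ++ [10]) ++ (if use_line_separator then [(23 : Int)] else [])
      else
        out ++ [(c.toNat : Int)])
    (if use_line_separator then [(23 : Int)] else [])) ++ [10]

-- ===== PRECONDITION & SPEC =====
def Spec_generate_file (cadena : String) (use_line_separator : Bool) (out : List Int) : Prop := out = generate_file_alt cadena use_line_separator
instance (cadena : String) (use_line_separator : Bool) (out : List Int) : Decidable (Spec_generate_file cadena use_line_separator out) := by unfold Spec_generate_file; infer_instance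

-- ===== CLAIM (what is proved, stated in full; the proofs are below) =====
def Claim_equal_generate_file : Prop := ∀ (cadena : String) (use_line_separator : Bool), Dom_generate_file cadena use_line_separator → Spec_generate_file cadena use_line_separator (generate_file cadena use_line_separator)

-- ===== LEMMAS AND PROOFS =====

-- structural characterisation of splitting on a single '\n'
def splitNL : List Char → List Char → List (List Char)
  | [], cur => [cur.reverse]
  | c :: r, cur => if c = '\n' then cur.reverse :: splitNL r [] else splitNL r (c :: cur)

theorem go_eq_splitNL : ∀ (fuel : Nat) (l cur : List Char) (acc : List (List Char)),
    l.length < fuel →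
    PySem.Chars.splitOn.go ['\n'] fuel l cur acc = acc.reverse ++ splitNL l cur := by
  intro fuel
  induction fuel with
  | zero => intro l cur acc h; omega
  | succ n ih =>
    intro l cur acc h
    cases l with
    | nil => rw [PySem.Chars.splitOn.go.eq_def]; simp [splitNL]
    | cons c rest =>
      rw [PySem.Chars.splitOn.go.eq_def]
      simp only [List.isPrefixOf, List.length_cons] at *
      by_cases hc : c = '\n'
      · subst hc
        simp only [beq_self_eq_true, Bool.true_and, if_true, List.length_nil,
          Nat.zero_add, List.drop_succ_cons, List.drop_zero]
        rw [ih rest [] (cur.reverse :: acc) (by omega)]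
        simp [splitNL]
      · have hcond : ('\n' == c) = false := by
          simp only [beq_eq_false_iff_ne, ne_eq]
          exact fun h' => hc h'.symm
        simp only [hcond, Bool.false_and, Bool.false_eq_true, if_false]
        rw [ih rest (c :: cur) acc (by omega)]
        simp [splitNL, hc]

theorem splitOn_eq_splitNL (cs : List Char) :
    PySem.Chars.splitOn cs ['\n'] = splitNL cs [] := by
  show PySem.Chars.splitOn.go ['\n'] (cs.length + 1) cs [] [] = splitNL cs []
  rw [go_eq_splitNL (cs.length + 1) cs [] [] (by omega)]
  simp

-- after both folds are turned into flatMaps, this connects A's per-line view with B's per-char view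
theorem flatMap_splitNL (uls : Bool) : ∀ (cs cur : List Char),
    (splitNL cs cur).flatMap
        (fun line => (if uls then [(23 : Int)] else []) ++ line.map (fun c => (c.toNat : Int)) ++ [10])
      = (if uls then [(23 : Int)] else []) ++ cur.reverse.map (fun c => (c.toNat : Int))
          ++ cs.flatMap (fun c => if c = '\n' then [10] ++ (if uls then [(23 : Int)] else []) else [(c.toNat : Int)])
          ++ [10] := by
  intro cs
  induction cs with
  | nil => intro cur; simp [splitNL]
  | cons c r ih =>
    intro cur
    by_cases hc : c = '\n'
    · subst hc
      simp only [splitNL, if_true, List.flatMap_cons]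
      rw [ih []]
      simp
    · simp only [splitNL, if_neg hc]
      rw [ih (c :: cur)]
      simp [hc]

theorem step_A (uls : Bool) (array : List Int) (line : List Char) :
    (let a1 := if uls then array ++ [char_to_ascii '\x17'] else array
     let a2 := line.foldl (fun a ch => a ++ [char_to_ascii ch]) a1
     a2 ++ [char_to_ascii '\n'])
      = array ++ ((if uls then [(23 : Int)] else []) ++ line.map (fun c => (c.toNat : Int)) ++ [10]) := by
  simp only [PySem.List.foldl_append_singleton_eq_map]
  cases uls <;> simp [char_to_ascii]

theorem step_B (uls : Bool) (out : List Int) (c : Char) :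
    (if c = '\n' then (out ++ [10]) ++ (if uls then [(23 : Int)] else []) else out ++ [(c.toNat : Int)])
      = out ++ (if c = '\n' then [10] ++ (if uls then [(23 : Int)] else []) else [(c.toNat : Int)]) := by
  split_ifs <;> simp

-- ===== VERDICT (by name: the statement is the Claim_ definition above) =====
theorem generate_file_spec : Claim_equal_generate_file := by
  intro cadena uls _
  show generate_file cadena uls = generate_file_alt cadena uls
  unfold generate_file generate_file_alt
  have hA : ∀ (lines : List (List Char)) (acc : List Int),
      lines.foldl
        (fun array line =>
          let a1 := if uls then array ++ [char_to_ascii '\x17'] else array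
          let a2 := line.foldl (fun a ch => a ++ [char_to_ascii ch]) a1
          a2 ++ [char_to_ascii '\n']) acc
        = lines.foldl
            (fun array line =>
              array ++ ((if uls then [(23 : Int)] else []) ++ line.map (fun c => (c.toNat : Int)) ++ [10])) acc := by
    intro lines acc
    simp only [step_A]
  rw [hA, PySem.List.foldl_append_eq_flatMap, splitOn_eq_splitNL, flatMap_splitNL]
  have hB0 : ∀ (cs : List Char) (acc : List Int),
      cs.foldl
        (fun out c =>
          if c = '\n' then (out ++ [10]) ++ (if uls then [(23 : Int)] else []) else out ++ [(c.toNat : Int)]) acc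
        = cs.foldl
            (fun out c =>
              out ++ (if c = '\n' then [10] ++ (if uls then [(23 : Int)] else []) else [(c.toNat : Int)])) acc := by
    intro cs acc
    simp only [step_B]
  rw [hB0, PySem.List.foldl_append_eq_flatMap]
  simp
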